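-- pv_equiv track=rewrite | github.com/JosephSAlemu/MCPFinal | final_project_se333_josephalemu/CodeBase/main.py | _parse_params
-- ===== SOURCE A (Python) =====
-- def _parse_params(raw_params: str) -> list[dict]:
--     """Parse a comma-separated parameter list into structured dicts."""
--     if not raw_params.strip():
--         return []
--
--     params = []
--     # Split on commas not inside angle brackets (generics)
--     depth = 0
--     current = ""
--     for ch in raw_params:
--         if ch in "<([":
--             depth += 1
--         elif ch in ">)]":
--             depth -= 1
--         if ch == "," and depth == 0:
--             params.append(current.strip())
--             current = ""
--         else:
--             current += ch
--     if current.strip():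
--         params.append(current.strip())
--
--     result = []
--     for p in params:
--         parts = p.split()
--         if len(parts) >= 2:
--             ptype = " ".join(parts[:-1])
--             pname = parts[-1]
--         else:
--             ptype = "Object"
--             pname = parts[0] if parts else "param"
--         result.append({"type": ptype, "name": pname})
--
--     return result
-- ===== SOURCE B (Python) =====
-- def _parse_params(raw_params: str) -> list[dict]:
--     """Parse a comma-separated parameter list into structured dicts."""
--     if not raw_params.strip():
--         return []
--     result = []
--     depth = 0
--     start = 0
--     for i, ch in enumerate(raw_params):
--         if ch in "<([":
--             depth += 1
--         elif ch in ">)]":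
--             depth -= 1
--         if ch == "," and depth == 0:
--             result.append(_make(raw_params[start:i].strip()))
--             start = i + 1
--     tail = raw_params[start:].strip()
--     if tail:
--         result.append(_make(tail))
--     return result
--
--
-- def _make(seg: str) -> dict:
--     parts = seg.split()
--     if len(parts) >= 2:
--         return {"type": " ".join(parts[:-1]), "name": parts[-1]}
--     return {"type": "Object", "name": parts[0] if parts else "param"}
-- ===== Notes on version B (the rewrite author's own statement) =====
-- stated objective: alternative
-- what changed: B parses in a single pass over character indices, slicing each depth-0 comma segment directly out of the input string and emitting its dict immediately, instead of A's two phases (growing a character buffer into an intermediate list of raw segment strings, then a second loop mapping them to dicts).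
import Mathlib
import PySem

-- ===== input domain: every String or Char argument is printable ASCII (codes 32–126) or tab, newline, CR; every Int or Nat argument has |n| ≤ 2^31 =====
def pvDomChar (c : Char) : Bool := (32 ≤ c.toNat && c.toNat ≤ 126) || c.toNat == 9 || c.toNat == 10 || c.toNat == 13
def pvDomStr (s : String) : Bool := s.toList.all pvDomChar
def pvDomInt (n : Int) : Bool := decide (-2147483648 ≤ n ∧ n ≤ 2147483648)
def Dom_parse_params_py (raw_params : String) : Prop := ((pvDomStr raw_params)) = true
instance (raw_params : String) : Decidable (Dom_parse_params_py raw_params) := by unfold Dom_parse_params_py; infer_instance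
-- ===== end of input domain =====

-- B is a single pass over character indices that slices each depth-0 comma segment out of the
-- input and emits its dict immediately, instead of A's two phases (accumulate a char buffer
-- into a raw-segment list, then map it to dicts); objective: alternative. Equal return values proved.

-- shared per-segment dict builder (identical code in both Pythons: A's result-loop body, B's _make)
def pvMk (p : List Char) : List (String × String) :=
  let parts := PySem.Chars.split₀ p
  if parts.length ≥ 2 then
    [("type", String.ofList (PySem.Chars.join [' '] parts.dropLast)),
     ("name", String.ofList (parts.getLastD []))]
  else
    [("type", "Object"),
     ("name", String.ofList (match parts with | [] => "param".toList | x :: _ => x))]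

-- ===== PORT A =====
-- A's char loop: state (depth, current, params)
def loopA : List Char → Int → List Char → List (List Char) → Int × List Char × List (List Char)
  | [], d, cur, ps => (d, cur, ps)
  | ch :: rest, d, cur, ps =>
    let d' := if ch = '<' ∨ ch = '(' ∨ ch = '[' then d + 1
              else if ch = '>' ∨ ch = ')' ∨ ch = ']' then d - 1 else d
    if ch = ',' ∧ d' = 0 then loopA rest d' [] (ps ++ [PySem.Chars.strip cur])
    else loopA rest d' (cur ++ [ch]) ps

def parse_params_py (raw_params : String) : List (List (String × String)) :=
  let cs := raw_params.toList
  if PySem.Chars.strip cs = [] then []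
  else
    let st := loopA cs 0 [] []
    let params := if PySem.Chars.strip st.2.1 ≠ [] then st.2.2 ++ [PySem.Chars.strip st.2.1] else st.2.2
    params.map pvMk

-- ===== PORT B =====
-- B's loop: 'for i, ch in enumerate(raw_params)' as recursion carrying the index i;
-- state (i, depth, start, result); slices the fixed input, emits dicts inline
def loopB (full : List Char) : List Char → Nat → Int → Nat → List (List (String × String)) → Nat × List (List (String × String))
  | [], _i, _d, start, res => (start, res)
  | ch :: rest, i, d, start, res =>
    let d' := if ch = '<' ∨ ch = '(' ∨ ch = '[' then d + 1
              else if ch = '>' ∨ ch = ')' ∨ ch = ']' then d - 1 else d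
    if ch = ',' ∧ d' = 0 then
      loopB full rest (i + 1) d' (i + 1)
        (res ++ [pvMk (PySem.Chars.strip (PySem.List.slice full (some (start : Int)) (some (i : Int))))])
    else loopB full rest (i + 1) d' start res

def parse_params_py_alt (raw_params : String) : List (List (String × String)) :=
  let cs := raw_params.toList
  if PySem.Chars.strip cs = [] then []
  else
    let st := loopB cs cs 0 0 0 []
    let tail := PySem.Chars.strip (PySem.List.slice cs (some (st.1 : Int)) none)
    if tail ≠ [] then st.2 ++ [pvMk tail] else st.2

-- ===== PRECONDITION & SPEC =====
def Spec_parse_params_py (raw_params : String) (out : List (List (String × String))) : Prop := out = parse_params_py_alt raw_params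
instance (raw_params : String) (out : List (List (String × String))) : Decidable (Spec_parse_params_py raw_params out) := by unfold Spec_parse_params_py; infer_instance

-- ===== CLAIM (what is proved, stated in full; the proofs are below) =====
def Claim_equal_parse_params_py : Prop := ∀ (raw_params : String), Dom_parse_params_py raw_params → Spec_parse_params_py raw_params (parse_params_py raw_params)

-- ===== LEMMAS AND PROOFS =====

-- invariant: if the input is pre ++ cur ++ rest, B's loop (at index pre.length + cur.length,
-- segment start pre.length, result ps.map pvMk) lands where A's loop does: result = ps'.map pvMk
-- and the final start index cuts the input exactly before A's leftover buffer cur'.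
lemma loopB_eq_loopA : ∀ (rest : List Char) (d : Int) (pre cur : List Char) (ps : List (List Char)),
    ∃ pre' : List Char, pre' ++ (loopA rest d cur ps).2.1 = pre ++ cur ++ rest ∧
      loopB (pre ++ cur ++ rest) rest (pre.length + cur.length) d pre.length (ps.map pvMk)
        = (pre'.length, ((loopA rest d cur ps).2.2).map pvMk) := by
  intro rest
  induction rest with
  | nil =>
    intro d pre cur ps
    exact ⟨pre, by simp [loopA, loopB]⟩
  | cons ch rest ih =>
    intro d pre cur ps
    simp only [loopA, loopB]
    set d' := if ch = '<' ∨ ch = '(' ∨ ch = '[' then d + 1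
              else if ch = '>' ∨ ch = ')' ∨ ch = ']' then d - 1 else d with hd'
    by_cases hc : ch = ',' ∧ d' = 0
    · simp only [if_pos hc]
      have hslice : PySem.List.slice (pre ++ cur ++ ch :: rest)
          (some (pre.length : Int)) (some ((pre.length + cur.length : Nat) : Int)) = cur := by
        rw [PySem.List.slice_natCast]
        simp
      rw [hslice]
      have hmap : (ps.map pvMk) ++ [pvMk (PySem.Chars.strip cur)]
          = (ps ++ [PySem.Chars.strip cur]).map pvMk := by simp
      rw [hmap]
      obtain ⟨pre', h1, h2⟩ := ih d' (pre ++ cur ++ [ch]) [] (ps ++ [PySem.Chars.strip cur])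
      refine ⟨pre', ?_, ?_⟩
      · simpa using h1
      · have hl : (pre ++ cur ++ [ch]).length = pre.length + cur.length + 1 := by simp [Nat.add_assoc]
        have := h2
        rw [hl] at this
        have e : pre.length + (cur.length + 1) = pre.length + cur.length + 1 := by omega
        simpa [e] using this
    · simp only [if_neg hc]
      obtain ⟨pre', h1, h2⟩ := ih d' pre (cur ++ [ch]) ps
      refine ⟨pre', ?_, ?_⟩
      · simpa using h1
      · have hl : (cur ++ [ch]).length = cur.length + 1 := by simp
        have := h2
        rw [hl] at this
        simpa [Nat.add_assoc] using this

-- ===== VERDICT (by name: the statement is the Claim_ definition above) =====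
theorem parse_params_py_spec : Claim_equal_parse_params_py := by
  intro raw_params _dom
  unfold Spec_parse_params_py parse_params_py parse_params_py_alt
  set cs := raw_params.toList with hcs
  by_cases h0 : PySem.Chars.strip cs = []
  · simp [h0]
  · simp only [if_neg h0]
    obtain ⟨pre', h1, h2⟩ := loopB_eq_loopA cs 0 [] [] []
    simp only [List.nil_append, List.length_nil, List.map_nil] at h1 h2
    rw [h2]
    have hdrop : cs.drop pre'.length = (loopA cs 0 [] []).2.1 := by
      conv_lhs => rw [← h1]
      simp
    have hslice : PySem.List.slice cs (some (pre'.length : Int)) none = (loopA cs 0 [] []).2.1 := by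
      rw [PySem.List.slice_from_natCast, hdrop]
    rw [hslice]
    by_cases ht : PySem.Chars.strip (loopA cs 0 [] []).2.1 ≠ []
    · simp [ht]
    · simp [ht]
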